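-- pv_equiv track=rewrite | github.com/ximen99/Liquid_Prod | lib/utils.py | sort_lists_move_unmatch_to_last
-- ===== SOURCE A (Python) =====
-- def sort_lists_move_unmatch_to_last(list1, list2):
--     list1.sort()
--     list2.sort()
--     list1_copy = list1.copy()
--     list2_copy = list2.copy()
--     for item in list1_copy:
--         if item not in list2_copy:
--             list1.remove(item)
--             list1.append(item)
--     for item in list2_copy:
--         if item not in list1_copy:
--             list2.remove(item)
--             list2.append(item)
--     return list1, list2
-- ===== SOURCE B (Python) =====
-- def sort_lists_move_unmatch_to_last(list1, list2):
--     s1, s2 = set(list1), set(list2)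
--     a, b = sorted(list1), sorted(list2)
--     list1[:] = [x for x in a if x in s2] + [x for x in a if x not in s2]
--     list2[:] = [x for x in b if x in s1] + [x for x in b if x not in s1]
--     return list1, list2
-- ===== Notes on version B (the rewrite author's own statement) =====
-- stated objective: faster
-- what changed: Replaced A's per-item list.remove/append moves with O(n^2) membership tests by a single stable partition of each sorted list against a hash set of the other list.
import Mathlib
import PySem

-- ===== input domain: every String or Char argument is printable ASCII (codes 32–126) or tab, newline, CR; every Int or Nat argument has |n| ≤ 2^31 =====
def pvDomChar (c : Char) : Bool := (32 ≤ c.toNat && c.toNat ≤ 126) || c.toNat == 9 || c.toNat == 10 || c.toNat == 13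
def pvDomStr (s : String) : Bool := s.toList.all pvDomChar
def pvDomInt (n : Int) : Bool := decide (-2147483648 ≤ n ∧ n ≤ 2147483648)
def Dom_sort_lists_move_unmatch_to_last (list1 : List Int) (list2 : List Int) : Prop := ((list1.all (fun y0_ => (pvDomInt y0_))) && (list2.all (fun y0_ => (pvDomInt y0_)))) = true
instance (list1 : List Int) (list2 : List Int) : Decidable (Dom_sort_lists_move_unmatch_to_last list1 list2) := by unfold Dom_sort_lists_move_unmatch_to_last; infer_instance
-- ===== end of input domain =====

-- B replaces A's quadratic remove/append loops by one stable partition of each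
-- sorted list against a set of the other list; equivalence is about the return
-- value (both Pythons also mutate list1/list2 in place to the same contents).

-- ===== PORT A =====
-- one iteration of A's for-loop body; remove? never actually fails here
-- (the item removed was just re-appended), so .getD acc is never the raising path
def pvMove (other : List Int) (acc : List Int) (item : Int) : List Int :=
  if item ∈ other then acc
  else ((PySem.List.remove? acc item).getD acc) ++ [item]

def sort_lists_move_unmatch_to_last (list1 : List Int) (list2 : List Int) : List Int × List Int :=
  let l1 := PySem.List.sorted list1 (fun x => x) false
  let l2 := PySem.List.sorted list2 (fun x => x) false
  let list1_copy := l1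
  let list2_copy := l2
  (list1_copy.foldl (pvMove list2_copy) l1, list2_copy.foldl (pvMove list1_copy) l2)

-- ===== PORT B =====
-- matched elements first (sorted order), then unmatched (sorted order)
def pvPart (s : PySem.Set Int) (a : List Int) : List Int :=
  a.filter (fun x => PySem.Set.contains s x) ++ a.filter (fun x => !(PySem.Set.contains s x))

def sort_lists_move_unmatch_to_last_alt (list1 : List Int) (list2 : List Int) : List Int × List Int :=
  let s1 := PySem.Set.ofList list1
  let s2 := PySem.Set.ofList list2
  let a := PySem.List.sorted list1 (fun x => x) false
  let b := PySem.List.sorted list2 (fun x => x) false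
  (pvPart s2 a, pvPart s1 b)

-- ===== PRECONDITION & SPEC =====
def Spec_sort_lists_move_unmatch_to_last (list1 : List Int) (list2 : List Int) (out : List Int × List Int) : Prop := out = sort_lists_move_unmatch_to_last_alt list1 list2
instance (list1 : List Int) (list2 : List Int) (out : List Int × List Int) : Decidable (Spec_sort_lists_move_unmatch_to_last list1 list2 out) := by unfold Spec_sort_lists_move_unmatch_to_last; infer_instance

-- ===== CLAIM (what is proved, stated in full; the proofs are below) =====
def Claim_equal_sort_lists_move_unmatch_to_last : Prop := ∀ (list1 : List Int) (list2 : List Int), Dom_sort_lists_move_unmatch_to_last list1 list2 → Spec_sort_lists_move_unmatch_to_last list1 list2 (sort_lists_move_unmatch_to_last list1 list2)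

-- ===== LEMMAS AND PROOFS =====

theorem pv_remove_middle (item : Int) (m r : List Int) (h : item ∉ m) :
    PySem.List.remove? (m ++ item :: r) item = some (m ++ r) := by
  have hmem : item ∈ m ++ item :: r := by simp
  rw [PySem.List.remove?_eq_some_erase _ _ hmem]
  rw [List.erase_append_right _ h, List.erase_cons_head]

-- invariant of A's move loop: processed matched items stay in front (m),
-- processed unmatched items are accumulated at the back (u)
theorem pv_loop (other : List Int) (c : List Int) :
    ∀ (m u : List Int), (∀ x ∈ m, x ∈ other) →
      c.foldl (pvMove other) (m ++ c ++ u)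
        = m ++ c.filter (fun x => decide (x ∈ other)) ++ (u ++ c.filter (fun x => !decide (x ∈ other))) := by
  induction c with
  | nil => intro m u _; simp
  | cons item c ih =>
      intro m u hm
      by_cases hin : item ∈ other
      · have h1 : m ++ (item :: c) ++ u = (m ++ [item]) ++ c ++ u := by simp
        have h2 := ih (m ++ [item]) u (by
          intro x hx
          rcases List.mem_append.mp hx with hx | hx
          · exact hm x hx
          · simpa using (by simpa using hx) ▸ hin)
        simp only [List.foldl_cons, pvMove, if_pos hin, h1, h2]
        simp [hin]
      · have hnm : item ∉ m := fun hmem => hin (hm item hmem)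
        have hrm : PySem.List.remove? (m ++ (item :: c) ++ u) item = some (m ++ (c ++ u)) := by
          have := pv_remove_middle item m (c ++ u) hnm
          simpa using this
        have h2 := ih m (u ++ [item]) hm
        simp only [List.foldl_cons, pvMove, if_neg hin, hrm, Option.getD_some]
        have h3 : m ++ (c ++ u) ++ [item] = m ++ c ++ (u ++ [item]) := by simp
        rw [h3, h2]
        simp [hin]

-- the whole loop is the stable partition
theorem pv_loop_part (other c : List Int) :
    c.foldl (pvMove other) c
      = c.filter (fun x => decide (x ∈ other)) ++ c.filter (fun x => !decide (x ∈ other)) := by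
  have := pv_loop other c [] [] (by intro x hx; simp at hx)
  simpa using this

-- membership in set(l) agrees with membership in sorted(l)
theorem pv_filter_contains (l a : List Int) :
    a.filter (fun x => PySem.Set.contains (PySem.Set.ofList l) x)
      = a.filter (fun x => decide (x ∈ PySem.List.sorted l (fun x => x) false)) := by
  apply List.filter_congr
  intro x _
  simp [PySem.Set.mem_ofList, PySem.List.mem_sorted]

theorem pv_filter_not_contains (l a : List Int) :
    a.filter (fun x => !(PySem.Set.contains (PySem.Set.ofList l) x))
      = a.filter (fun x => !decide (x ∈ PySem.List.sorted l (fun x => x) false)) := by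
  apply List.filter_congr
  intro x _
  simp [PySem.Set.mem_ofList, PySem.List.mem_sorted]

-- ===== VERDICT (by name: the statement is the Claim_ definition above) =====
theorem sort_lists_move_unmatch_to_last_spec : Claim_equal_sort_lists_move_unmatch_to_last := by
  intro list1 list2 _
  unfold Spec_sort_lists_move_unmatch_to_last
  unfold sort_lists_move_unmatch_to_last sort_lists_move_unmatch_to_last_alt pvPart
  simp only []
  rw [pv_loop_part, pv_loop_part, pv_filter_contains, pv_filter_not_contains,
      pv_filter_contains, pv_filter_not_contains]
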